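-- pv_equiv track=rewrite | github.com/david-acker/advent-of-code-2024 | solutions/day5/main.py | setup_page_dependencies
-- ===== SOURCE A (Python) =====
-- from typing import Dict, List, Set, Tuple
--
-- def setup_page_dependencies(page_ordering_rules: List[Tuple[int, int]]) -> Dict[int, Set[int]]:
--     page_dependencies: Dict[int, Set[int]] = {}
--
--     for (before, after) in page_ordering_rules:
--         if after not in page_dependencies:
--             page_dependencies[after] = set()
--
--         page_dependencies[after].add(before)
--
--         if (before not in page_dependencies):
--             page_dependencies[before] = set()
--
--     return page_dependencies
-- ===== SOURCE B (Python) =====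
-- from typing import Dict, List, Set, Tuple
--
-- def setup_page_dependencies(page_ordering_rules: List[Tuple[int, int]]) -> Dict[int, Set[int]]:
--     pages: List[int] = []
--     for before, after in page_ordering_rules:
--         if after not in pages:
--             pages.append(after)
--         if before not in pages:
--             pages.append(before)
--     return {p: {b for (b, a) in page_ordering_rules if a == p} for p in pages}
-- ===== Notes on version B (the rewrite author's own statement) =====
-- stated objective: alternative
-- what changed: Replaces A's single incremental pass that grows per-key sets in a dict with a two-phase collect-universe-then-rescan strategy: first gather the distinct pages in order of first appearance, then build the result as a dict comprehension that rescans the rule list for each page's predecessors.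
import Mathlib
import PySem

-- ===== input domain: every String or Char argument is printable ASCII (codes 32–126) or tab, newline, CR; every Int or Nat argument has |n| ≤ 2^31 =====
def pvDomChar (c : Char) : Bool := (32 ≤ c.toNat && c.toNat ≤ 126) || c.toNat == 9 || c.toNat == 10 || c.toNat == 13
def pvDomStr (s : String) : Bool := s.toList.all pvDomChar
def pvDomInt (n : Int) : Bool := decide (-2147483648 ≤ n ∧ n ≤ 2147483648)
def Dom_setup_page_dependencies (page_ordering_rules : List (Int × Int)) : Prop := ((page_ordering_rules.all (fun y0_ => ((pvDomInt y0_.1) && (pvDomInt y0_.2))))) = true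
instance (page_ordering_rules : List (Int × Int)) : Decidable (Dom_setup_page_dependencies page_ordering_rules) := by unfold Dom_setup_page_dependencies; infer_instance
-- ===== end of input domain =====

-- B replaces A's single incremental dict-building pass by a collect-the-page-universe-then-rescan
-- strategy (alternative decomposition, O(n^2) rescans vs A's one pass; return value only).

-- ===== PORT A =====
-- loop body of A's for-loop, as a named helper
def pvStepA (d : PySem.Dict Int (PySem.Set Int)) (r : Int × Int) : PySem.Dict Int (PySem.Set Int) :=
  let d1 := if d.contains r.2 then d else d.insert r.2 PySem.Set.empty
  let d2 := d1.modify r.2 PySem.Set.empty (fun s => PySem.Set.add s r.1)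
  if d2.contains r.1 then d2 else d2.insert r.1 PySem.Set.empty

def setup_page_dependencies (page_ordering_rules : List (Int × Int)) : List (Int × List Int) :=
  (page_ordering_rules.foldl pvStepA PySem.Dict.empty).items

-- ===== PORT B =====
-- loop body of B's universe-collecting for-loop
def pvStepB (ps : List Int) (r : Int × Int) : List Int :=
  let ps1 := if r.2 ∈ ps then ps else ps ++ [r.2]
  if r.1 ∈ ps1 then ps1 else ps1 ++ [r.1]

def pvPages (page_ordering_rules : List (Int × Int)) : List Int :=
  page_ordering_rules.foldl pvStepB []

-- {b for (b, a) in page_ordering_rules if a == p}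
def pvPreds (page_ordering_rules : List (Int × Int)) (p : Int) : PySem.Set Int :=
  PySem.Set.ofList ((page_ordering_rules.filter (fun r => r.2 == p)).map Prod.fst)

def setup_page_dependencies_alt (page_ordering_rules : List (Int × Int)) : List (Int × List Int) :=
  (pvPages page_ordering_rules).map (fun p => (p, pvPreds page_ordering_rules p))

-- ===== PRECONDITION & SPEC =====
def Spec_setup_page_dependencies (page_ordering_rules : List (Int × Int)) (out : List (Int × List Int)) : Prop := out = setup_page_dependencies_alt page_ordering_rules
instance (page_ordering_rules : List (Int × Int)) (out : List (Int × List Int)) : Decidable (Spec_setup_page_dependencies page_ordering_rules out) := by unfold Spec_setup_page_dependencies; infer_instance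

-- ===== CLAIM (what is proved, stated in full; the proofs are below) =====
def Claim_equal_setup_page_dependencies : Prop := ∀ (page_ordering_rules : List (Int × Int)), Dom_setup_page_dependencies page_ordering_rules → Spec_setup_page_dependencies page_ordering_rules (setup_page_dependencies page_ordering_rules)

-- ===== LEMMAS AND PROOFS =====

theorem mem_foldl_stepB (l : List (Int × Int)) (ps : List Int) (x : Int) :
    x ∈ l.foldl pvStepB ps ↔ x ∈ ps ∨ ∃ r ∈ l, x = r.1 ∨ x = r.2 := by
  induction l generalizing ps with
  | nil => simp
  | cons r t ih =>
    simp only [List.foldl_cons, ih, pvStepB]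
    split_ifs <;> simp_all <;> aesop

theorem nodup_foldl_stepB (l : List (Int × Int)) (ps : List Int) (h : ps.Nodup) :
    (l.foldl pvStepB ps).Nodup := by
  induction l generalizing ps with
  | nil => simpa
  | cons r t ih =>
    refine ih _ ?_
    simp only [pvStepB]
    split_ifs with h1 h2 h2 <;> simp_all [List.nodup_append] <;> aesop

theorem mem_pages_of_mem (l : List (Int × Int)) (r : Int × Int) (hr : r ∈ l) :
    r.1 ∈ pvPages l ∧ r.2 ∈ pvPages l := by
  constructor <;> (rw [pvPages, mem_foldl_stepB]; right; exact ⟨r, hr, by simp⟩)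

theorem nodup_pages (l : List (Int × Int)) : (pvPages l).Nodup :=
  nodup_foldl_stepB l [] (by simp)

theorem preds_of_not_mem (l : List (Int × Int)) (p : Int) (h : p ∉ pvPages l) :
    pvPreds l p = PySem.Set.empty := by
  have hf : l.filter (fun r => r.2 == p) = [] := by
    rw [List.filter_eq_nil_iff]
    intro r hr hb
    exact h (by simpa [(beq_iff_eq).mp hb] using (mem_pages_of_mem l r hr).2)
  simp [pvPreds, hf, PySem.Set.ofList]

theorem pages_append (l : List (Int × Int)) (r : Int × Int) :
    pvPages (l ++ [r]) = pvStepB (pvPages l) r := by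
  simp [pvPages, List.foldl_append]

theorem preds_append (l : List (Int × Int)) (b a p : Int) :
    pvPreds (l ++ [(b, a)]) p = if a = p then PySem.Set.add (pvPreds l p) b else pvPreds l p := by
  by_cases h : a = p <;>
    simp [pvPreds, List.filter_append, h, PySem.Set.ofList, List.foldl_append]

theorem dict_contains (d : PySem.Dict Int (PySem.Set Int)) (P : List Int) (F : Int → PySem.Set Int)
    (h : d.items = P.map (fun p => (p, F p))) (x : Int) :
    d.contains x = decide (x ∈ P) := by
  simp [PySem.Dict.contains, h, List.any_map, Function.comp_def, List.any_beq',
    List.contains_eq_mem]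

theorem dict_getD (d : PySem.Dict Int (PySem.Set Int)) (P : List Int) (F : Int → PySem.Set Int)
    (h : d.items = P.map (fun p => (p, F p))) (hnd : P.Nodup) (a : Int) (haP : a ∈ P) :
    d.getD a PySem.Set.empty = F a := by
  apply PySem.Dict.getD_of_mem_items
  · rw [h]; exact List.mem_map.mpr ⟨a, haP, rfl⟩
  · simp only [PySem.Dict.keys, h, List.map_map]
    simpa [Function.comp_def]

theorem dict_insert_items (d : PySem.Dict Int (PySem.Set Int)) (P : List Int)
    (F : Int → PySem.Set Int) (h : d.items = P.map (fun p => (p, F p))) (a : Int)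
    (v : PySem.Set Int) :
    (d.insert a v).items =
      (if a ∈ P then P else P ++ [a]).map (fun p => (p, if p = a then v else F p)) := by
  have hc : d.contains a = decide (a ∈ P) := dict_contains d P F h a
  by_cases haP : a ∈ P
  · rw [PySem.Dict.items_insert_of_contains d v (by simp [hc, haP])]
    simp only [haP, if_true, h, List.map_map]
    refine List.map_congr_left ?_
    intro p hp
    by_cases hpa : p = a <;> simp [hpa]
  · rw [PySem.Dict.items_insert_of_not_contains d v (by simp [hc, haP])]
    simp only [haP, if_false, List.map_append, h]
    congr 1
    · refine List.map_congr_left ?_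
      intro p hp
      have hpa : p ≠ a := fun hEq => haP (hEq ▸ hp)
      simp [hpa]
    · simp

theorem invariant (l : List (Int × Int)) :
    (l.foldl pvStepA PySem.Dict.empty).items = (pvPages l).map (fun p => (p, pvPreds l p)) := by
  induction l using List.reverseRecOn with
  | nil => simp [pvPages, pvPreds, PySem.Set.ofList]; rfl
  | append_singleton l r ih =>
    obtain ⟨b, a⟩ := r
    rw [List.foldl_append, List.foldl_cons, List.foldl_nil, pages_append]
    set d := l.foldl pvStepA PySem.Dict.empty with hd
    set P := pvPages l with hP
    have hnd : P.Nodup := nodup_pages l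
    -- the page universe after the two conditional key-insertions for this rule
    have hP1nd : (if a ∈ P then P else P ++ [a]).Nodup := by
      by_cases haP : a ∈ P
      · simpa [haP] using hnd
      · rw [if_neg haP]
        exact hnd.append (List.nodup_singleton a)
          (fun x hx hxa => haP ((List.mem_singleton.mp hxa) ▸ hx))
    have haP1 : a ∈ (if a ∈ P then P else P ++ [a]) := by
      by_cases haP : a ∈ P <;> simp [haP]
    have hsubP1 : P ⊆ (if a ∈ P then P else P ++ [a]) := by
      by_cases haP : a ∈ P <;> intro x hx <;> simp [haP, hx]
    -- state after the first conditional insert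
    have hd1 : (if d.contains a then d else d.insert a PySem.Set.empty).items
        = (if a ∈ P then P else P ++ [a]).map (fun p => (p, pvPreds l p)) := by
      rw [dict_contains d P _ ih a]
      by_cases haP : a ∈ P
      · simp [haP, ih]
      · simp only [haP, decide_false, Bool.false_eq_true, if_false]
        rw [dict_insert_items d P _ ih a PySem.Set.empty]
        simp only [haP, if_false]
        refine List.map_congr_left ?_
        intro p hp
        by_cases hpa : p = a
        · subst hpa
          simp [preds_of_not_mem l p haP]
        · simp [hpa]
    set d1 := if d.contains a then d else d.insert a PySem.Set.empty with hd1def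
    set P1 := if a ∈ P then P else P ++ [a] with hP1def
    -- state after d[after].add(before), i.e. the modify
    have hgetD : d1.getD a PySem.Set.empty = pvPreds l a :=
      dict_getD d1 P1 _ hd1 hP1nd a haP1
    have hd2 : (d1.modify a PySem.Set.empty (fun s => PySem.Set.add s b)).items
        = P1.map (fun p => (p, pvPreds (l ++ [(b, a)]) p)) := by
      rw [PySem.Dict.modify, hgetD, dict_insert_items d1 P1 _ hd1 a _]
      simp only [haP1, if_true]
      refine List.map_congr_left ?_
      intro p hp
      rw [preds_append]
      by_cases hpa : p = a
      · subst hpa; simp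
      · have hap : ¬ a = p := fun hEq => hpa hEq.symm
        simp [hpa, hap]
    set d2 := d1.modify a PySem.Set.empty (fun s => PySem.Set.add s b) with hd2def
    -- final conditional insert of `before`
    show (if d2.contains b then d2 else d2.insert b PySem.Set.empty).items
        = (pvStepB P (b, a)).map (fun p => (p, pvPreds (l ++ [(b, a)]) p))
    have hPstep : pvStepB P (b, a) = if b ∈ P1 then P1 else P1 ++ [b] := by
      simp [pvStepB, hP1def]
    rw [dict_contains d2 P1 _ hd2 b, hPstep]
    by_cases hbP1 : b ∈ P1
    · simp [hbP1, hd2]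
    · simp only [hbP1, decide_false, Bool.false_eq_true, if_false]
      rw [dict_insert_items d2 P1 _ hd2 b PySem.Set.empty]
      simp only [hbP1, if_false]
      refine List.map_congr_left ?_
      intro p hp
      by_cases hpb : p = b
      · subst hpb
        have hpP : p ∉ P := fun hm => hbP1 (hsubP1 hm)
        have hpa : ¬ a = p := fun hEq => hbP1 (hEq ▸ haP1)
        rw [preds_append]
        simp [hpa, preds_of_not_mem l p hpP]
      · simp [hpb]

-- ===== VERDICT (by name: the statement is the Claim_ definition above) =====
theorem setup_page_dependencies_spec : Claim_equal_setup_page_dependencies := by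
  intro l _
  show setup_page_dependencies l = setup_page_dependencies_alt l
  rw [setup_page_dependencies, setup_page_dependencies_alt, invariant]
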